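-- pv_equiv track=rewrite | github.com/zhenzhizhi12/GraphDistill | core/search_engine.py | _extract_keyword_sections
-- ===== SOURCE A (Python) =====
-- from typing import Any, Dict, List, Optional, Sequence, Set, Tuple
--
-- def _extract_keyword_sections(
--     text: str,
--     keywords: List[str],
--     max_chars: int,
-- ) -> str:
--     """按 Markdown 标题切分段落，优先提取包含关键词的段落。"""
--     sections: List[Tuple[str, bool]] = []
--     current_lines: List[str] = []
--     for line in text.split("\n"):
--         if line.startswith("#") and current_lines:
--             block = "\n".join(current_lines)
--             block_lower = block.lower()
--             has_kw = any(kw in block_lower for kw in keywords)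
--             sections.append((block, has_kw))
--             current_lines = [line]
--         else:
--             current_lines.append(line)
--     if current_lines:
--         block = "\n".join(current_lines)
--         block_lower = block.lower()
--         has_kw = any(kw in block_lower for kw in keywords)
--         sections.append((block, has_kw))
--
--     # 先选包含关键词的段落，再按原始顺序填充其余段落
--     result_parts: List[str] = []
--     used = 0
--     for block, has_kw in sections:
--         if has_kw and used + len(block) <= max_chars:
--             result_parts.append(block)
--             used += len(block)
--     # 如果关键词段落不够，补充非关键词段落（保持顺序）
--     if used < max_chars // 2:
--         for block, has_kw in sections:
--             if not has_kw and used + len(block) <= max_chars: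
--                 result_parts.append(block)
--                 used += len(block)
--     if used < len(text):
--         result_parts.append("\n...（关键词定向截取）")
--     return "\n".join(result_parts)
-- ===== SOURCE B (Python) =====
-- from typing import List, Tuple
--
--
-- def _greedy(blocks: List[str], used: int, limit: int) -> Tuple[List[str], int]:
--     """Greedily take blocks, in order, while they fit within limit."""
--     out: List[str] = []
--     for b in blocks:
--         if used + len(b) <= limit:
--             out.append(b)
--             used += len(b)
--     return out, used
--
--
-- def _extract_keyword_sections(
--     text: str,
--     keywords: List[str],
--     max_chars: int,
-- ) -> str:
--     # Parse back-to-front: walking the lines in reverse, a line joins the block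
--     # below it unless that block starts with a heading, in which case it opens
--     # a new block.
--     lines = text.split("\n")
--     blocks: List[List[str]] = []
--     for line in reversed(lines):
--         if blocks and not blocks[0][0].startswith("#"):
--             blocks[0] = [line] + blocks[0]
--         else:
--             blocks = [[line]] + blocks
--     sections = ["\n".join(b) for b in blocks]
--
--     def has_kw(s: str) -> bool:
--         low = s.lower()
--         return any(kw in low for kw in keywords)
--
--     kw_secs = [s for s in sections if has_kw(s)]
--     other_secs = [s for s in sections if not has_kw(s)]
--     chosen, used = _greedy(kw_secs, 0, max_chars)
--     if used < max_chars // 2: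
--         more, used = _greedy(other_secs, used, max_chars)
--         chosen = chosen + more
--     if used < len(text):
--         chosen = chosen + ["\n...（关键词定向截取）"]
--     return "\n".join(chosen)
-- ===== Notes on version B (the rewrite author's own statement) =====
-- stated objective: alternative
-- what changed: Parsing is rebuilt back-to-front: a reverse fold that merges a line into the block below it unless that block starts with a heading, replacing A's forward accumulator-and-flush scan; selection is decomposed into filtering sections by keyword flag and one reusable greedy helper applied to each filtered list instead of two flag-guarded passes over the mixed list.
import Mathlib
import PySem

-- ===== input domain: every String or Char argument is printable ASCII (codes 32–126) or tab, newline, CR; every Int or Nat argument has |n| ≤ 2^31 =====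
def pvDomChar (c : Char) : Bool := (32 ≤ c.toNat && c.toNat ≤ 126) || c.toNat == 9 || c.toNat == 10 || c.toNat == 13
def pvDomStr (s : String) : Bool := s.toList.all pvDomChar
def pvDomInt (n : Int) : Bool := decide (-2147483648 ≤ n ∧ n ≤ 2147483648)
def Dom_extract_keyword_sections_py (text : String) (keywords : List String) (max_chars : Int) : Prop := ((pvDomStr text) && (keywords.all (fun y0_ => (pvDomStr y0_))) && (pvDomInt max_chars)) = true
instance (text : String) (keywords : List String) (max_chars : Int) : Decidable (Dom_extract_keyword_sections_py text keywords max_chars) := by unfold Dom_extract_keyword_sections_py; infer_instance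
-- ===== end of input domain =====

-- B rebuilds the parsing back-to-front (a reverse fold merging each line into the block below
-- unless that block starts with a heading) and decomposes selection into filter + one reusable
-- greedy helper; objective: alternative (same cost, different algorithmic decomposition).

-- ===== PORT A =====
-- A-side helpers: the loop bodies of A, step for step.
def aHasKw (keywords : List String) (block : String) : Bool :=
  let block_lower := PySem.Str.lower block
  keywords.any (fun kw => PySem.Str.isIn kw block_lower)

-- flushing current_lines into a (block, has_kw) pair, exactly as A does at a heading / at the end
def aFlush (keywords : List String) (cur : List String) : String × Bool :=
  (PySem.Str.join "\n" cur, aHasKw keywords (PySem.Str.join "\n" cur))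

-- one iteration of A's `for line in text.split("\n")` loop; state = (sections, current_lines)
def aParseStep (keywords : List String) (st : List (String × Bool) × List String) (line : String) :
    List (String × Bool) × List String :=
  if PySem.Str.startswith line "#" && !st.2.isEmpty then
    (st.1 ++ [aFlush keywords st.2], [line])
  else
    (st.1, st.2 ++ [line])

-- A's trailing `if current_lines:` flush
def aFinish (keywords : List String) (st : List (String × Bool) × List String) : List (String × Bool) :=
  if st.2.isEmpty then st.1 else st.1 ++ [aFlush keywords st.2]

-- one iteration of A's selection loops (want = True for the keyword pass, False for the filler pass)
def aPickStep (max_chars : Int) (want : Bool) (st : List String × Int) (sb : String × Bool) :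
    List String × Int :=
  if sb.2 == want && decide (st.2 + PySem.Str.len sb.1 ≤ max_chars) then
    (st.1 ++ [sb.1], st.2 + PySem.Str.len sb.1)
  else st

-- text.split("\n") = (split? text "\n").getD [] : split? is never none for the non-empty separator "\n"
def extract_keyword_sections_py (text : String) (keywords : List String) (max_chars : Int) : String :=
  let lines := (PySem.Str.split? text "\n").getD []
  let sections := aFinish keywords (lines.foldl (aParseStep keywords) ([], []))
  let r1 := sections.foldl (aPickStep max_chars true) ([], 0)
  let r2 := if r1.2 < PySem.Int.floordiv max_chars 2 then
              sections.foldl (aPickStep max_chars false) r1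
            else r1
  let parts := if r2.2 < PySem.Str.len text then r2.1 ++ ["\n...（关键词定向截取）"] else r2.1
  PySem.Str.join "\n" parts

-- ===== PORT B =====
-- one iteration of B's reverse loop; a block is a list of lines, newest block in front.
-- (Python's blocks[0][0] presupposes a non-empty first block, which always holds; the
-- catch-all arm covers the empty-blocks start.)
def altMerge (blocks : List (List String)) (line : String) : List (List String) :=
  match blocks with
  | (m :: b0) :: rest =>
      if !PySem.Str.startswith m "#" then (line :: m :: b0) :: rest
      else [line] :: (m :: b0) :: rest
  | _ => [line] :: blocks

def altGreedyStep (limit : Int) (st : List String × Int) (b : String) : List String × Int :=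
  if st.2 + PySem.Str.len b ≤ limit then (st.1 ++ [b], st.2 + PySem.Str.len b) else st

-- B's _greedy helper: returns (out, used)
def altGreedy (blocks : List String) (used : Int) (limit : Int) : List String × Int :=
  blocks.foldl (altGreedyStep limit) ([], used)

def altHasKw (keywords : List String) (block : String) : Bool :=
  let block_lower := PySem.Str.lower block
  keywords.any (fun kw => PySem.Str.isIn kw block_lower)

def extract_keyword_sections_py_alt (text : String) (keywords : List String) (max_chars : Int) : String :=
  let lines := (PySem.Str.split? text "\n").getD []
  let blocks := lines.reverse.foldl altMerge []
  let sections := blocks.map (fun b => PySem.Str.join "\n" b)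
  let kwSecs := sections.filter (fun s => altHasKw keywords s)
  let otherSecs := sections.filter (fun s => !altHasKw keywords s)
  let p1 := altGreedy kwSecs 0 max_chars
  let p2 := if p1.2 < PySem.Int.floordiv max_chars 2 then
              (p1.1 ++ (altGreedy otherSecs p1.2 max_chars).1, (altGreedy otherSecs p1.2 max_chars).2)
            else p1
  let chosen := if p2.2 < PySem.Str.len text then p2.1 ++ ["\n...（关键词定向截取）"] else p2.1
  PySem.Str.join "\n" chosen

-- ===== PRECONDITION & SPEC =====
def Spec_extract_keyword_sections_py (text : String) (keywords : List String) (max_chars : Int) (out : String) : Prop := out = extract_keyword_sections_py_alt text keywords max_chars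
instance (text : String) (keywords : List String) (max_chars : Int) (out : String) : Decidable (Spec_extract_keyword_sections_py text keywords max_chars out) := by unfold Spec_extract_keyword_sections_py; infer_instance

-- ===== CLAIM (what is proved, stated in full; the proofs are below) =====
def Claim_equal_extract_keyword_sections_py : Prop := ∀ (text : String) (keywords : List String) (max_chars : Int), Dom_extract_keyword_sections_py text keywords max_chars → Spec_extract_keyword_sections_py text keywords max_chars (extract_keyword_sections_py text keywords max_chars)

-- ===== LEMMAS AND PROOFS =====

-- The common middle between the two parses: A's accumulator loop written as structural recursion…
def pvLoopA : List String → List String → List (List String)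
  | cur, [] => [cur]
  | cur, l :: ls =>
      if PySem.Str.startswith l "#" && !cur.isEmpty then cur :: pvLoopA [l] ls
      else pvLoopA (cur ++ [l]) ls

-- …and the block list of a whole line list.
def pvChunks : List String → List (List String)
  | [] => []
  | l :: ls => pvLoopA [l] ls

theorem pv_isEmpty_false {α : Type} {l : List α} (h : l ≠ []) : l.isEmpty = false := by
  cases l with
  | nil => exact absurd rfl h
  | cons _ _ => rfl

-- A's parse loop (fold + trailing flush) computes pvLoopA, mapped through aFlush.
theorem parseA_eq (keywords : List String) :
    ∀ (ls : List String) (secs : List (String × Bool)) (cur : List String), cur ≠ [] →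
      aFinish keywords (ls.foldl (aParseStep keywords) (secs, cur))
        = secs ++ (pvLoopA cur ls).map (aFlush keywords) := by
  intro ls
  induction ls with
  | nil =>
    intro secs cur h
    simp [aFinish, pvLoopA, pv_isEmpty_false h]
  | cons l ls ih =>
    intro secs cur h
    have hcur := pv_isEmpty_false h
    rw [List.foldl_cons]
    by_cases hp : PySem.Chars.startswith l.toList ['#'] = true
    · have hstep : aParseStep keywords (secs, cur) l = (secs ++ [aFlush keywords cur], [l]) := by
        simp [aParseStep, hp, hcur]
      rw [hstep, ih _ [l] (by simp)]
      simp [pvLoopA, hp, h]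
    · have hstep : aParseStep keywords (secs, cur) l = (secs, cur ++ [l]) := by
        simp [aParseStep, hp]
      rw [hstep, ih _ _ (by simp)]
      simp [pvLoopA, hp]

-- the first block produced by pvLoopA starts with cur
theorem loopA_head : ∀ (ls : List String) (cur : List String), cur ≠ [] →
    ∃ tl rest, pvLoopA cur ls = (cur ++ tl) :: rest := by
  intro ls
  induction ls with
  | nil => intro cur h; exact ⟨[], [], by simp [pvLoopA]⟩
  | cons l ls ih =>
    intro cur h
    by_cases hp : PySem.Chars.startswith l.toList ['#'] = true
    · exact ⟨[], pvLoopA [l] ls, by simp [pvLoopA, hp, h]⟩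
    · obtain ⟨tl, rest, hh⟩ := ih (cur ++ [l]) (by simp)
      exact ⟨l :: tl, rest, by simp [pvLoopA, hp, hh]⟩

-- prepending a line to a non-empty current block only changes the first produced block
theorem loopA_prepend : ∀ (ls : List String) (cur : List String) (x : String), cur ≠ [] →
    pvLoopA (x :: cur) ls = (x :: (pvLoopA cur ls).headI) :: (pvLoopA cur ls).tail := by
  intro ls
  induction ls with
  | nil => intro cur x h; simp [pvLoopA]
  | cons l ls ih =>
    intro cur x h
    by_cases hp : PySem.Chars.startswith l.toList ['#'] = true
    · simp [pvLoopA, hp, h]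
    · have hx : pvLoopA (x :: cur) (l :: ls) = pvLoopA (x :: (cur ++ [l])) ls := by
        simp [pvLoopA, hp]
      rw [hx, ih (cur ++ [l]) x (by simp)]
      simp [pvLoopA, hp]

-- B's reverse-merge step extends the chunk list exactly like reading one more line at the front
theorem altMerge_chunks : ∀ (ls : List String) (l : String),
    altMerge (pvChunks ls) l = pvChunks (l :: ls) := by
  intro ls l
  cases ls with
  | nil => simp [pvChunks, altMerge, pvLoopA]
  | cons m t =>
    show altMerge (pvLoopA [m] t) l = pvLoopA [l] (m :: t)
    obtain ⟨tl, rest, h⟩ := loopA_head t [m] (by simp)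
    simp only [List.singleton_append] at h
    by_cases hp : PySem.Chars.startswith m.toList ['#'] = true
    · have hA : altMerge ((m :: tl) :: rest) l = [l] :: (m :: tl) :: rest := by
        simp [altMerge, hp]
      have hB : pvLoopA [l] (m :: t) = [l] :: pvLoopA [m] t := by simp [pvLoopA, hp]
      rw [h, hA, hB, ← h]
    · have hA : altMerge ((m :: tl) :: rest) l = (l :: m :: tl) :: rest := by
        simp [altMerge, hp]
      have hB : pvLoopA [l] (m :: t) = pvLoopA [l, m] t := by simp [pvLoopA, hp]
      rw [h, hA, hB, show ([l, m] : List String) = l :: [m] from rfl,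
        loopA_prepend t [m] l (by simp), h]
      simp

-- B's whole reverse fold produces the chunk list
theorem foldr_chunks : ∀ ls : List String,
    ls.foldr (fun line bs => altMerge bs line) [] = pvChunks ls := by
  intro ls
  induction ls with
  | nil => rfl
  | cons l t ih => rw [List.foldr_cons, ih, altMerge_chunks]

-- A's flag-guarded selection pass over all sections = plain greedy pass over the filtered ones
theorem pick_filter (mc : Int) (want : Bool) :
    ∀ (secs : List (String × Bool)) (st : List String × Int),
      secs.foldl (aPickStep mc want) st
        = ((secs.filter (fun sb => sb.2 == want)).map (fun sb => sb.1)).foldl (altGreedyStep mc) st := by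
  intro secs
  induction secs with
  | nil => intro st; rfl
  | cons sb t ih =>
    intro st
    rw [List.foldl_cons, List.filter_cons]
    by_cases hw : sb.2 == want
    · rw [if_pos hw, List.map_cons, List.foldl_cons, ← ih]
      have : aPickStep mc want st sb = altGreedyStep mc st sb.1 := by
        simp only [aPickStep, altGreedyStep, hw, Bool.true_and]
        split_ifs <;> simp_all <;> omega
      rw [this]
    · have hw' : (sb.2 == want) = false := by simpa using hw
      rw [if_neg (by simp [hw']), ← ih]
      simp [aPickStep, hw']

-- a greedy pass started from (acc, u) = acc ++ (the pass started from ([], u))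
theorem pick_acc (mc : Int) :
    ∀ (l : List String) (st : List String × Int),
      l.foldl (altGreedyStep mc) st
        = (st.1 ++ (l.foldl (altGreedyStep mc) ([], st.2)).1,
           (l.foldl (altGreedyStep mc) ([], st.2)).2) := by
  intro l
  induction l with
  | nil => intro st; simp
  | cons b t ih =>
    intro st
    rw [List.foldl_cons, List.foldl_cons]
    by_cases hf : st.2 + (b.length : Int) ≤ mc
    · have h1 : altGreedyStep mc st b = (st.1 ++ [b], st.2 + (b.length : Int)) := by
        simp [altGreedyStep, hf]
      have h2 : altGreedyStep mc ([], st.2) b = ([b], st.2 + (b.length : Int)) := by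
        simp [altGreedyStep, hf]
      rw [h1, h2, ih (st.1 ++ [b], st.2 + (b.length : Int)), ih ([b], st.2 + (b.length : Int))]
      simp
    · have h1 : altGreedyStep mc st b = st := by simp [altGreedyStep, hf]
      have h2 : altGreedyStep mc ([], st.2) b = ([], st.2) := by simp [altGreedyStep, hf]
      rw [h1, h2]
      exact ih st

theorem hasKw_eq : aHasKw = altHasKw := rfl

-- filtered+projected (block, flag) pairs = flag-filtered joined blocks
theorem secs_bridge (keywords : List String) (want : Bool) :
    ∀ (S : List (List String)),
      ((S.map (aFlush keywords)).filter (fun sb => sb.2 == want)).map (fun sb => sb.1)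
        = (S.map (fun b => PySem.Str.join "\n" b)).filter (fun s => altHasKw keywords s == want) := by
  intro S
  induction S with
  | nil => rfl
  | cons b t ih =>
    simp only [List.map_cons, List.filter_cons]
    by_cases hb : altHasKw keywords (PySem.Str.join "\n" b) == want
    · rw [if_pos (by simpa [aFlush, hasKw_eq] using hb), if_pos hb, List.map_cons, ih]
      simp [aFlush]
    · rw [if_neg (by simpa [aFlush, hasKw_eq] using hb), if_neg hb, ih]

-- ===== VERDICT (by name: the statement is the Claim_ definition above) =====
theorem extract_keyword_sections_py_spec : Claim_equal_extract_keyword_sections_py := by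
  intro text keywords max_chars _hdom
  unfold Spec_extract_keyword_sections_py
  simp only [extract_keyword_sections_py, extract_keyword_sections_py_alt, altGreedy]
  generalize (PySem.Str.split? text "\n").getD [] = lines
  have hsec : aFinish keywords (lines.foldl (aParseStep keywords) ([], []))
      = (pvChunks lines).map (aFlush keywords) := by
    cases lines with
    | nil => simp [aFinish, pvChunks]
    | cons l rest =>
      rw [List.foldl_cons]
      have h0 : aParseStep keywords ([], []) l = ([], [l]) := by simp [aParseStep]
      rw [h0, parseA_eq keywords rest [] [l] (by simp)]
      simp [pvChunks]
  have hblocks : lines.reverse.foldl altMerge [] = pvChunks lines := by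
    rw [List.foldl_reverse]
    exact foldr_chunks lines
  rw [hsec, hblocks]
  rw [pick_filter max_chars true, pick_filter max_chars false]
  rw [secs_bridge keywords true, secs_bridge keywords false]
  have e1 : (fun s => altHasKw keywords s == true) = (fun s => altHasKw keywords s) := by
    funext s; cases altHasKw keywords s <;> rfl
  have e2 : (fun s => altHasKw keywords s == false) = (fun s => !altHasKw keywords s) := by
    funext s; cases altHasKw keywords s <;> rfl
  rw [e1, e2]
  have hacc := pick_acc max_chars
      (((pvChunks lines).map (fun b => PySem.Str.join "\n" b)).filter
        (fun s => !altHasKw keywords s))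
      ((((pvChunks lines).map (fun b => PySem.Str.join "\n" b)).filter
        (fun s => altHasKw keywords s)).foldl (altGreedyStep max_chars) ([], 0))
  rw [hacc]
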